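-- pv_equiv track=rewrite | github.com/daniel-reich/ubiquitous-fiesta | aMTXfakahQ45oZbJP_6.py | complete_bracelet
-- ===== SOURCE A (Python) =====
-- def complete_bracelet(lst):
--   if len(set(lst)) == 1:
--     return False
--   a = 2
--   while a <= (len(lst)+1)//2:
--     if any([lst == lst[:a]*i for i in range(len(lst)//2 + 1)]):
--       return True
--     a += 1
--   return False
-- ===== SOURCE B (Python) =====
-- def complete_bracelet(lst):
--     n = len(lst)
--     if n < 2 or all(x == lst[0] for x in lst):
--         return False
--     for a in range(2, n // 2 + 1):
--         if n % a == 0 and lst[a:] == lst[:n - a]: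
--             return True
--     return False
-- ===== Notes on version B (the rewrite author's own statement) =====
-- stated objective: faster
-- what changed: Instead of testing every candidate period a against every repetition count i by building the repeated list lst[:a]*i (A's nested any over slices), B checks each a up to n//2 once: a must divide n and the list must equal itself shifted by a (lst[a:] == lst[:n-a]), one O(n) comparison per divisor.
import Mathlib
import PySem

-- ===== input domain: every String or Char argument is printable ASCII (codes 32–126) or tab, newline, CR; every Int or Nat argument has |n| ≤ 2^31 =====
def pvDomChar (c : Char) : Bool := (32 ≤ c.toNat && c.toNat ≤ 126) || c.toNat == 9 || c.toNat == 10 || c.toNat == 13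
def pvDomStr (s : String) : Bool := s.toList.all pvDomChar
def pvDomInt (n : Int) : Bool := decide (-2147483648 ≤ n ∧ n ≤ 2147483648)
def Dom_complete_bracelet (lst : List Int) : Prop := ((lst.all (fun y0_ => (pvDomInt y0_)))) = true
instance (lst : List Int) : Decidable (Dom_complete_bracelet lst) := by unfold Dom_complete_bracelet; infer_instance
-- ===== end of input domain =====

-- B replaces A's nested scan (every period a, every repeat count i, building lst[:a]*i)
-- by one shift-comparison per divisor a of n; objective: faster (asymptotic).

-- ===== PORT A =====
-- Python 'xs * i' on a list (i from range, hence a Nat here)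
def listMul (xs : List Int) : Nat → List Int
  | 0 => []
  | i + 1 => xs ++ listMul xs i

-- the 'while a <= (len(lst)+1)//2' loop; lst[:a] with a ≥ 0 is lst.take a (exact)
def bracLoop (lst : List Int) (a : Nat) : Bool :=
  if _h : a ≤ (lst.length + 1) / 2 then
    if (List.range (lst.length / 2 + 1)).any (fun i => lst == listMul (lst.take a) i) then
      true
    else bracLoop lst (a + 1)
  else false
termination_by (lst.length + 1) / 2 + 1 - a
decreasing_by omega

def complete_bracelet (lst : List Int) : Bool :=
  if (PySem.Set.ofList lst).length == 1 then false
  else bracLoop lst 2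

-- ===== PORT B =====
def complete_bracelet_alt (lst : List Int) : Bool :=
  let n := lst.length
  if n < 2 then false
  else if lst.all (fun x => x == lst.headI) then false  -- all(x == lst[0] for x in lst); n ≥ 2 here
  else (List.range' 2 (n / 2 - 1)).any (fun a =>        -- range(2, n//2 + 1)
    n % a == 0 && lst.drop a == lst.take (n - a))       -- lst[a:] == lst[:n-a] (a, n-a ≥ 0: exact)

-- ===== PRECONDITION & SPEC =====
def Spec_complete_bracelet (lst : List Int) (out : Bool) : Prop := out = complete_bracelet_alt lst
instance (lst : List Int) (out : Bool) : Decidable (Spec_complete_bracelet lst out) := by unfold Spec_complete_bracelet; infer_instance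

-- ===== CLAIM (what is proved, stated in full; the proofs are below) =====
def Claim_equal_complete_bracelet : Prop := ∀ (lst : List Int), Dom_complete_bracelet lst → Spec_complete_bracelet lst (complete_bracelet lst)

-- ===== LEMMAS AND PROOFS =====

theorem listMul_length (xs : List Int) (i : Nat) : (listMul xs i).length = xs.length * i := by
  induction i with
  | zero => simp [listMul]
  | succ k ih => simp [listMul, ih]; ring

-- drop one block
theorem drop_listMul (xs : List Int) (i : Nat) :
    (listMul xs (i + 1)).drop xs.length = listMul xs i := by
  simp [listMul]

-- take all but one block
theorem take_listMul (xs : List Int) (i : Nat) :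
    (listMul xs (i + 1)).take (xs.length * i) = listMul xs i := by
  induction i with
  | zero => simp [listMul]
  | succ k ih =>
    have hstep : listMul xs (k + 2) = xs ++ listMul xs (k + 1) := rfl
    rw [hstep, List.take_append, List.take_of_length_le (by nlinarith)]
    have hlen : xs.length * (k + 1) - xs.length = xs.length * k := by
      have : xs.length * (k + 1) = xs.length * k + xs.length := by ring
      omega
    rw [hlen, ih]
    rfl

-- reconstruction: shift-equality + right length ⇒ lst is m copies of its first block
theorem listMul_of_shift (a : Nat) (ha : 1 ≤ a) :
    ∀ (m : Nat) (lst : List Int), lst.length = a * m →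
      lst.drop a = lst.take (lst.length - a) → lst = listMul (lst.take a) m := by
  intro m
  induction m with
  | zero =>
    intro lst hlen _
    have : lst = [] := List.eq_nil_of_length_eq_zero (by omega)
    simp [this, listMul]
  | succ k ih =>
    intro lst hlen hshift
    have hstep : listMul (lst.take a) (k + 1) = lst.take a ++ listMul (lst.take a) k := rfl
    rcases Nat.eq_zero_or_pos k with hk | hk
    · subst hk
      have h1 : lst.take a = lst := List.take_of_length_le (by omega)
      rw [hstep, h1]; simp [listMul]
    · -- k ≥ 1, so a ≤ lst.length - a
      have h2a : 2 * a ≤ lst.length := by nlinarith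
      have hle : a ≤ lst.length := by omega
      have haa : a ≤ lst.length - a := by omega
      have htlen : (lst.drop a).length = a * k := by
        have : a * (k + 1) = a * k + a := by ring
        simp [hlen]; omega
      have hta : (lst.drop a).take a = lst.take a := by
        rw [hshift, List.take_take]
        congr 1
        omega
      have htshift : (lst.drop a).drop a = (lst.drop a).take ((lst.drop a).length - a) := by
        rw [htlen]
        conv_lhs => rw [hshift]
        rw [List.drop_take]
        congr 1
        have : a * (k + 1) = a * k + a := by ring
        omega
      have hrec := ih (lst.drop a) htlen htshift
      calc lst = lst.take a ++ lst.drop a := (List.take_append_drop a lst).symm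
        _ = lst.take a ++ listMul ((lst.drop a).take a) k := by rw [← hrec]
        _ = lst.take a ++ listMul (lst.take a) k := by rw [hta]
        _ = listMul (lst.take a) (k + 1) := hstep.symm

-- inner predicates, as Props
theorem innerA_iff (lst : List Int) (a : Nat) :
    ((List.range (lst.length / 2 + 1)).any (fun i => lst == listMul (lst.take a) i)) = true ↔
      ∃ i, i < lst.length / 2 + 1 ∧ lst = listMul (lst.take a) i := by
  simp only [List.any_eq_true, List.mem_range, beq_iff_eq]

theorem innerB_iff (lst : List Int) (a : Nat) :
    ((lst.length % a == 0 && lst.drop a == lst.take (lst.length - a)) = true) ↔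
      (a ∣ lst.length ∧ lst.drop a = lst.take (lst.length - a)) := by
  simp only [Bool.and_eq_true, beq_iff_eq, Nat.dvd_iff_mod_eq_zero]

-- the per-candidate equivalence, for a in A's loop range (2 ≤ a < n)
theorem inner_equiv (lst : List Int) (a : Nat) (ha2 : 2 ≤ a) (han : a < lst.length) :
    (∃ i, i < lst.length / 2 + 1 ∧ lst = listMul (lst.take a) i) ↔
      (a ∣ lst.length ∧ lst.drop a = lst.take (lst.length - a)) := by
  have htakelen : (lst.take a).length = a := by
    simp [List.length_take]; omega
  constructor
  · rintro ⟨i, _, heq⟩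
    cases i with
    | zero =>
      exfalso
      simp only [listMul] at heq
      rw [heq] at han
      simp at han
    | succ j =>
      have hlen : lst.length = a * (j + 1) := by
        have := congrArg List.length heq
        simpa [listMul_length, htakelen] using this
      have hmul : a * (j + 1) = a * j + a := by ring
      refine ⟨⟨j + 1, hlen⟩, ?_⟩
      have hd : lst.drop a = listMul (lst.take a) j := by
        have h := drop_listMul (lst.take a) j
        rw [htakelen] at h
        calc lst.drop a = (listMul (lst.take a) (j + 1)).drop a := by rw [← heq]
          _ = listMul (lst.take a) j := h
      have htk : lst.take (lst.length - a) = listMul (lst.take a) j := by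
        have h := take_listMul (lst.take a) j
        rw [htakelen] at h
        calc lst.take (lst.length - a) = lst.take (a * j) := by rw [hlen]; congr 1; omega
          _ = (listMul (lst.take a) (j + 1)).take (a * j) := by rw [← heq]
          _ = listMul (lst.take a) j := h
      rw [hd, htk]
  · rintro ⟨⟨m, hm⟩, hshift⟩
    refine ⟨m, ?_, listMul_of_shift a (by omega) m lst hm hshift⟩
    have h2m : 2 * m ≤ lst.length := by nlinarith
    omega

-- unrolled characterisation of A's while loop
theorem bracLoop_iff (lst : List Int) :
    ∀ (a : Nat), bracLoop lst a = true ↔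
      ∃ b, a ≤ b ∧ b ≤ (lst.length + 1) / 2 ∧
        ((List.range (lst.length / 2 + 1)).any (fun i => lst == listMul (lst.take b) i)) = true := by
  intro a
  generalize hfuel : (lst.length + 1) / 2 + 1 - a = k
  induction k generalizing a with
  | zero =>
    have hna : ¬ a ≤ (lst.length + 1) / 2 := by omega
    rw [bracLoop, dif_neg hna]
    exact iff_of_false (by simp) (by rintro ⟨b, hb1, hb2, -⟩; omega)
  | succ k ih =>
    rw [bracLoop]
    by_cases h : a ≤ (lst.length + 1) / 2
    · rw [dif_pos h]
      by_cases h2 : ((List.range (lst.length / 2 + 1)).any (fun i => lst == listMul (lst.take a) i)) = true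
      · rw [if_pos h2]
        exact iff_of_true rfl ⟨a, le_refl a, h, h2⟩
      · rw [if_neg h2, ih (a + 1) (by omega)]
        constructor
        · rintro ⟨b, hb1, hb2, hb3⟩
          exact ⟨b, by omega, hb2, hb3⟩
        · rintro ⟨b, hb1, hb2, hb3⟩
          rcases Nat.eq_or_lt_of_le hb1 with rfl | h'
          · exact absurd hb3 h2
          · exact ⟨b, by omega, hb2, hb3⟩
    · rw [dif_neg h]
      exact iff_of_false (by simp) (by rintro ⟨b, hb1, hb2, -⟩; omega)

theorem headI_mem_self (lst : List Int) (h : lst ≠ []) : lst.headI ∈ lst := by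
  cases lst with
  | nil => exact absurd rfl h
  | cons x xs => simp

-- the constant test of A equals the constant test of B
theorem setlen_one_iff (lst : List Int) :
    ((PySem.Set.ofList lst).length == 1) = true ↔
      (lst ≠ [] ∧ lst.all (fun x => x == lst.headI) = true) := by
  simp only [beq_iff_eq, List.all_eq_true, beq_iff_eq]
  constructor
  · intro h
    obtain ⟨x, hx⟩ := List.length_eq_one_iff.mp h
    have hmem : ∀ y ∈ lst, y = x := by
      intro y hy
      have hm : y ∈ PySem.Set.ofList lst := (PySem.Set.mem_ofList lst y).mpr hy
      rw [hx] at hm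
      simpa using hm
    have hne : lst ≠ [] := by
      intro hnil
      rw [hnil] at hx
      simp [PySem.Set.ofList] at hx
    refine ⟨hne, fun y hy => ?_⟩
    rw [hmem y hy, hmem _ (headI_mem_self lst hne)]
  · rintro ⟨hne, hall⟩
    have hsub : ∀ y ∈ PySem.Set.ofList lst, y = lst.headI :=
      fun y hy => hall y ((PySem.Set.mem_ofList lst y).mp hy)
    have hmem : lst.headI ∈ PySem.Set.ofList lst :=
      (PySem.Set.mem_ofList lst lst.headI).mpr (headI_mem_self lst hne)
    have hnd : (PySem.Set.ofList lst).Nodup := PySem.Set.nodup_ofList lst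
    rcases hl : PySem.Set.ofList lst with - | ⟨y, ys⟩
    · rw [hl] at hmem; cases hmem
    · rw [hl] at hsub hnd
      cases ys with
      | nil => rfl
      | cons z zs =>
        exfalso
        have hy := hsub y (by simp)
        have hz := hsub z (by simp)
        have hyz : y ≠ z := by
          simp only [List.nodup_cons, List.mem_cons] at hnd
          exact fun h => hnd.1 (Or.inl h)
        exact hyz (hy.trans hz.symm)

-- ===== VERDICT (by name: the statement is the Claim_ definition above) =====
theorem complete_bracelet_spec : Claim_equal_complete_bracelet := by
  intro lst _
  unfold Spec_complete_bracelet
  by_cases hconst : ((PySem.Set.ofList lst).length == 1) = true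
  · obtain ⟨hne, hall⟩ := (setlen_one_iff lst).mp hconst
    unfold complete_bracelet complete_bracelet_alt
    rw [if_pos hconst]
    by_cases h2 : lst.length < 2
    · simp [h2]
    · simp [h2, hall]
  · unfold complete_bracelet
    rw [if_neg hconst]
    by_cases h2 : lst.length < 2
    · have hloop : bracLoop lst 2 = false := by
        rw [bracLoop, dif_neg (by omega)]
      rw [hloop]
      unfold complete_bracelet_alt
      simp [h2]
    · have hne : lst ≠ [] := by
        intro h; rw [h] at h2; simp at h2
      have hallf : lst.all (fun x => x == lst.headI) = false := by
        cases hb : lst.all (fun x => x == lst.headI) with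
        | false => rfl
        | true => exact absurd ((setlen_one_iff lst).mpr ⟨hne, hb⟩) hconst
      unfold complete_bracelet_alt
      rw [if_neg h2, if_neg (by simp [hallf])]
      rw [Bool.eq_iff_iff, bracLoop_iff, List.any_eq_true]
      constructor
      · rintro ⟨b, hb2, hbU, hbA⟩
        have hblt : b < lst.length := by omega
        obtain ⟨hdvd, hsh⟩ := (inner_equiv lst b hb2 hblt).mp ((innerA_iff lst b).mp hbA)
        obtain ⟨m, hm⟩ := hdvd
        have hbhalf : b ≤ lst.length / 2 := by
          rcases m with - | - | j
          · omega
          · omega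
          · have h2b : 2 * b ≤ lst.length := by nlinarith
            omega
        refine ⟨b, ?_, (innerB_iff lst b).mpr ⟨⟨m, hm⟩, hsh⟩⟩
        simp only [List.mem_range'_1]
        omega
      · rintro ⟨b, hbmem, hbB⟩
        simp only [List.mem_range'_1] at hbmem
        have hb2 : 2 ≤ b := hbmem.1
        have hbhalf : b ≤ lst.length / 2 := by omega
        have hblt : b < lst.length := by omega
        obtain ⟨hdvd, hsh⟩ := (innerB_iff lst b).mp hbB
        exact ⟨b, hb2, by omega,
          (innerA_iff lst b).mpr ((inner_equiv lst b hb2 hblt).mpr ⟨hdvd, hsh⟩)⟩
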